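-- pv_equiv track=rewrite | github.com/Darispeg/Grupo_3_tick_tack_toe | src/test/TestRules.py | numeroHermanos
-- ===== SOURCE A (Python) =====
-- import math
--
-- TABLERO_FILAS=3
--
-- TABLERO_COLUMNAS=3
--
-- def numeroHermanos(casilla, ficha, v, h, tablero):
--     """
--     # Tablero
--     ## X   O   O
--     ## O  [ ]  X
--     ## X  [ ]  X
--
--     # Columnas
--         ## Atras
--     >>> numeroHermanos(4, 'X', 0, -1, ['X','O','O','O',' ','X','X',' ','X'])
--     1
--
--         ## Adelante
--     >>> numeroHermanos(4, 'X', 0, 1, ['X','O','O','O',' ','X','X',' ','X'])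
--     1
--
--     # Filas
--         ## Atras
--     >>> numeroHermanos(7, 'X', -1, 0, ['X','O','O','O',' ','X','X',' ','X'])
--     0
--
--         ## Adelante
--     >>> numeroHermanos(7, 'X', 1, 0, ['X','O','O','O',' ','X','X',' ','X'])
--     0
--
--     # Diagonal ( / )
--         ## Atras
--     >>> numeroHermanos(4, 'X', -1,-1, ['X','O','O','O',' ','X','X',' ','X'])
--     0
--
--         ## Adelante
--     >>> numeroHermanos(4, 'X', -1, 1, ['X','O','O','O',' ','X','X',' ','X'])
--     0
--
--     # Diagonal (`\`)
--         ## Atras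
--     >>> numeroHermanos(4, 'X', -1, -1, ['X','O','O','O',' ','X','X',' ','X'])
--     0
--
--         ## Adelante
--     >>> numeroHermanos(4, 'X', 1, 1, ['X','O','O','O',' ','X','X',' ','X'])
--     0
--
--
--     """
--     f = math.floor(casilla/TABLERO_COLUMNAS) #Obtengo la fila
--     c = casilla % TABLERO_COLUMNAS #columna
--     fila_nueva = f + v
--     if(fila_nueva < 0 or fila_nueva >= TABLERO_FILAS):
--         return 0
--     columna_nueva= c + h
--     if(columna_nueva < 0 or columna_nueva >= TABLERO_COLUMNAS):
--         return 0
--     #No estamos en el limite así que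
--     #calculamos la nueva posición y vemos si hay la misma ficha
--     pos=(fila_nueva*TABLERO_COLUMNAS + columna_nueva)
--     if(tablero[pos] != ficha):
--         return 0
--     else:
--         return 1 + numeroHermanos(pos, ficha, v, h, tablero)
-- ===== SOURCE B (Python) =====
-- TABLERO_FILAS = 3
--
-- TABLERO_COLUMNAS = 3
--
-- def numeroHermanos(casilla, ficha, v, h, tablero):
--     # Two staged passes: first collect the cells along the ray (at most one
--     # per board square), then count the matching prefix.
--     f = casilla // TABLERO_COLUMNAS
--     c = casilla % TABLERO_COLUMNAS
--     cells = []
--     for _ in range(TABLERO_FILAS * TABLERO_COLUMNAS):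
--         f += v
--         c += h
--         if 0 <= f < TABLERO_FILAS and 0 <= c < TABLERO_COLUMNAS:
--             cells.append(tablero[f * TABLERO_COLUMNAS + c])
--         else:
--             break
--     count = 0
--     for x in cells:
--         if x != ficha:
--             break
--         count += 1
--     return count
-- ===== Notes on version B (the rewrite author's own statement) =====
-- stated objective: alternative
-- what changed: Replaces the recursion that interleaves bounds checks, board lookup and the 1+... sum down the call chain with two staged passes: a generation loop that collects the cells lying along the ray (capped by the board size), followed by a separate loop counting the matching prefix of that list.
-- outside the precondition, e.g. on numeroHermanos(0, 'X', 1, 0, ['O', 'O', 'O', 'O']): A returns 0, B raises IndexError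
import Mathlib
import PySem

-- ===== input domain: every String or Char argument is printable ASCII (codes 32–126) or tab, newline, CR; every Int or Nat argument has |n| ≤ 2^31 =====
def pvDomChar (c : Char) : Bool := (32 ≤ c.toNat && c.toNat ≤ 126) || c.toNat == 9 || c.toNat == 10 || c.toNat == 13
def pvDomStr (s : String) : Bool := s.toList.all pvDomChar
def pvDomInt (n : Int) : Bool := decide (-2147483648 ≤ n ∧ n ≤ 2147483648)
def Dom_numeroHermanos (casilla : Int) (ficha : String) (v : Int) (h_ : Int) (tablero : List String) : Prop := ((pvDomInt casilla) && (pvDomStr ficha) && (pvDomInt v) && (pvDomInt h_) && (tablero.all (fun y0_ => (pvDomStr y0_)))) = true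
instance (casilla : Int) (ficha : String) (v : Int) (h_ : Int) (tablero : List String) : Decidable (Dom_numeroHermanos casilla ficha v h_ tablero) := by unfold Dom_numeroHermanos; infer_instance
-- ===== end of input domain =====

-- B replaces A's recursion by two staged passes: collect the ray's cells, then count the matching prefix (alternative decomposition; same cost). Equal return values are proved on Pre_.


-- ===== PORT A =====
-- math.floor(casilla/3) is exact for |casilla| ≤ 2^31 (the Dom bound), so it is ported as floor division.
-- The recursion is bounded by fuel 9: with (v,h_) ≠ (0,0) the row (or column) changes strictly each step
-- inside the 3×3 grid, so Python's recursion depth is at most 4; the v = h_ = 0 self-match case, where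
-- the Python diverges (RecursionError), is excluded by Pre_numeroHermanos.
def numeroHermanosGo (fuel : Nat) (casilla : Int) (ficha : String) (v : Int) (h_ : Int) (tablero : List String) : Int :=
  match fuel with
  | 0 => 0
  | fuel + 1 =>
    let f := PySem.Int.floordiv casilla 3
    let c := PySem.Int.mod casilla 3
    let filaNueva := f + v
    if filaNueva < 0 ∨ filaNueva ≥ 3 then 0
    else
      let columnaNueva := c + h_
      if columnaNueva < 0 ∨ columnaNueva ≥ 3 then 0
      else
        let pos := filaNueva * 3 + columnaNueva
        match PySem.List.pyGet? tablero pos with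
        | none => 0   -- IndexError in Python; such inputs are outside Pre_numeroHermanos
        | some x => if x ≠ ficha then 0 else 1 + numeroHermanosGo fuel pos ficha v h_ tablero

def numeroHermanos (casilla : Int) (ficha : String) (v : Int) (h_ : Int) (tablero : List String) : Int :=
  numeroHermanosGo 9 casilla ficha v h_ tablero

-- ===== PORT B =====
-- pass 1 of Source B: the generation for-loop (range(9) becomes the Nat counter), building the cell list
def rayCells (steps : Nat) (f c v h_ : Int) (tablero : List String) : List String :=
  match steps with
  | 0 => []
  | steps + 1 =>
    let f' := f + v
    let c' := c + h_
    if 0 ≤ f' ∧ f' < 3 ∧ 0 ≤ c' ∧ c' < 3 then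
      match PySem.List.pyGet? tablero (f' * 3 + c') with
      | some x => x :: rayCells steps f' c' v h_ tablero
      | none => []   -- IndexError in Python; outside Pre_numeroHermanos
    else []

-- pass 2 of Source B: the counting for-loop with its break, as recursion over the list
def matchingPrefix (ficha : String) (cells : List String) : Int :=
  match cells with
  | [] => 0
  | x :: xs => if x = ficha then 1 + matchingPrefix ficha xs else 0

def numeroHermanos_alt (casilla : Int) (ficha : String) (v : Int) (h_ : Int) (tablero : List String) : Int :=
  matchingPrefix ficha
    (rayCells 9 (PySem.Int.floordiv casilla 3) (PySem.Int.mod casilla 3) v h_ tablero)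

-- ===== PRECONDITION & SPEC =====
-- Pre_ excludes (a) boards with fewer than 9 cells when the first step lands on the grid — there the
-- walk can index past the end of the list and raise IndexError — and (b) the degenerate direction
-- v = h_ = 0 stepping onto a matching cell, where the Python A never returns (RecursionError).
def Pre_numeroHermanos (casilla : Int) (ficha : String) (v : Int) (h_ : Int) (tablero : List String) : Prop :=
  ((9:Int) ≤ tablero.length ∨
    PySem.Int.floordiv casilla 3 + v < 0 ∨ 3 ≤ PySem.Int.floordiv casilla 3 + v ∨
    PySem.Int.mod casilla 3 + h_ < 0 ∨ 3 ≤ PySem.Int.mod casilla 3 + h_) ∧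
  ¬ (v = 0 ∧ h_ = 0 ∧ 0 ≤ casilla ∧ casilla < 9 ∧ PySem.List.pyGet? tablero casilla = some ficha)
instance (casilla : Int) (ficha : String) (v : Int) (h_ : Int) (tablero : List String) : Decidable (Pre_numeroHermanos casilla ficha v h_ tablero) := by unfold Pre_numeroHermanos; infer_instance

def pvWitness_numeroHermanos : Int × String × Int × Int × List String :=
  (4, "X", 0, -1, ["X","O","O","O"," ","X","X"," ","X"])

def Spec_numeroHermanos (casilla : Int) (ficha : String) (v : Int) (h_ : Int) (tablero : List String) (out : Int) : Prop := out = numeroHermanos_alt casilla ficha v h_ tablero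
instance (casilla : Int) (ficha : String) (v : Int) (h_ : Int) (tablero : List String) (out : Int) : Decidable (Spec_numeroHermanos casilla ficha v h_ tablero out) := by unfold Spec_numeroHermanos; infer_instance

-- ===== CLAIM (what is proved, stated in full; the proofs are below) =====
def Claim_equal_numeroHermanos : Prop := ∀ (casilla : Int) (ficha : String) (v : Int) (h_ : Int) (tablero : List String), Dom_numeroHermanos casilla ficha v h_ tablero → Pre_numeroHermanos casilla ficha v h_ tablero → Spec_numeroHermanos casilla ficha v h_ tablero (numeroHermanos casilla ficha v h_ tablero)

-- ===== LEMMAS AND PROOFS =====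

theorem floordiv_grid (f c : Int) (h0 : 0 ≤ c) (h3 : c < 3) :
    PySem.Int.floordiv (f * 3 + c) 3 = f ∧ PySem.Int.mod (f * 3 + c) 3 = c := by
  rw [PySem.Int.floordiv_eq_ediv_of_pos (by omega), PySem.Int.mod_eq_emod_of_pos (by omega)]
  omega

-- A's recursive count equals the matching prefix of the generated cell list, step for step
theorem go_eq_prefix (fuel : Nat) (f c : Int) (ficha : String) (v h_ : Int) (tablero : List String)
    (h0 : 0 ≤ c) (h3 : c < 3) :
    numeroHermanosGo fuel (f * 3 + c) ficha v h_ tablero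
      = matchingPrefix ficha (rayCells fuel f c v h_ tablero) := by
  induction fuel generalizing f c with
  | zero => simp [numeroHermanosGo, rayCells, matchingPrefix]
  | succ fuel ih =>
    rw [numeroHermanosGo, rayCells]
    simp only [(floordiv_grid f c h0 h3).1, (floordiv_grid f c h0 h3).2]
    by_cases hin : 0 ≤ f + v ∧ f + v < 3 ∧ 0 ≤ c + h_ ∧ c + h_ < 3
    · rw [if_pos hin, if_neg (by omega), if_neg (by omega)]
      cases hg : PySem.List.pyGet? tablero ((f + v) * 3 + (c + h_)) with
      | none => simp [matchingPrefix]
      | some x =>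
        by_cases hs : x = ficha
        · simp only [hs, ne_eq, not_true_eq_false, if_false, matchingPrefix, if_true]
          rw [ih (f + v) (c + h_) (by omega) (by omega)]
        · simp [hs, matchingPrefix]
    · rw [if_neg hin]
      by_cases hf : f + v < 0 ∨ f + v ≥ 3
      · rcases hf with hf | hf <;> simp [hf, matchingPrefix]
      · push_neg at hf
        rw [if_neg (by omega), if_pos (by omega)]
        simp [matchingPrefix]

-- ===== VERDICT (by name: the statement is the Claim_ definition above) =====
theorem numeroHermanos_spec : Claim_equal_numeroHermanos := by
  intro casilla ficha v h_ tablero _ _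
  unfold Spec_numeroHermanos numeroHermanos numeroHermanos_alt
  have hm : 0 ≤ PySem.Int.mod casilla 3 ∧ PySem.Int.mod casilla 3 < 3 := by
    rw [PySem.Int.mod_eq_emod_of_pos (by omega)]; omega
  rw [← go_eq_prefix 9 _ _ ficha v h_ tablero hm.1 hm.2,
    PySem.Int.floordiv_mul_add_mod casilla 3]
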